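-- pv_equiv track=rewrite | github.com/vovanrew/plantuml-in-wild-dataset | phase3/validate_puml_has_images.py | check_puml_has_image
-- ===== SOURCE A (Python) =====
-- from typing import Set, Tuple
--
-- def check_puml_has_image(puml_stem: str, image_stems: Set[str]) -> bool:
--     """
--     Check if a PUML file has at least one corresponding image.
--
--     Matching logic:
--     1. Exact match: diagram.puml -> diagram.png
--     2. Multi-page pattern: diagram.puml -> diagram_001.png, diagram_002.png, etc.
--
--     Args:
--         puml_stem: PUML filename without extension (e.g., "diagram")
--         image_stems: Set of all image file stems
--
--     Returns:
--         True if at least one corresponding image exists, False otherwise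
--     """
--     # Check exact match first
--     if puml_stem in image_stems:
--         return True
--
--     # Check for multi-page pattern: {puml_name}_001, {puml_name}_002, etc.
--     # We only need to find at least ONE matching image
--     for img_stem in image_stems:
--         # Check if image starts with puml_stem followed by _XXX
--         if img_stem.startswith(puml_stem + "_"):
--             # Extract suffix after puml_stem_
--             suffix = img_stem[len(puml_stem) + 1:]
--             # Check if suffix is exactly 3 digits
--             if suffix.isdigit() and len(suffix) == 3:
--                 return True
--
--     return False
-- ===== SOURCE B (Python) =====
-- def check_puml_has_image(puml_stem, image_stems):
--     # Instead of scanning the whole set, test the 1001 possible matching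
--     # stems (exact + _000.._999) by direct set membership.
--     if puml_stem in image_stems:
--         return True
--     prefix = puml_stem + "_"
--     digits = "0123456789"
--     for a in digits:
--         for b in digits:
--             for c in digits:
--                 if prefix + a + b + c in image_stems:
--                     return True
--     return False
-- ===== Notes on version B (the rewrite author's own statement) =====
-- stated objective: faster
-- what changed: B never scans the set of image stems: it enumerates the 1000 possible three-digit suffixes and tests each candidate stem by O(1) set membership, instead of A's scan over every image stem with startswith/isdigit checks.
import Mathlib
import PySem

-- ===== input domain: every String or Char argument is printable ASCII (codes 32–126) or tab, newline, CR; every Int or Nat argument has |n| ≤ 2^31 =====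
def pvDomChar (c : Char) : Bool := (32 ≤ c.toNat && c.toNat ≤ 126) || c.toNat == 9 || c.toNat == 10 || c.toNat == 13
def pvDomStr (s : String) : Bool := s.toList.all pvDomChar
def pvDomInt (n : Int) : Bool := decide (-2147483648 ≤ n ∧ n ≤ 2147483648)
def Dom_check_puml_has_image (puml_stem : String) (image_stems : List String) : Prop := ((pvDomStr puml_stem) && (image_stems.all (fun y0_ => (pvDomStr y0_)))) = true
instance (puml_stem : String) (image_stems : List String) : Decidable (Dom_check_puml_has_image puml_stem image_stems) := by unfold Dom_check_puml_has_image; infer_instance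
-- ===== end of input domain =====

-- B replaces A's scan of the image-stem set by membership tests of the 1001 possible matching stems (exact and _000.._999); measurably faster on large sets.


-- ===== PORT A =====
-- loop body of A: startswith check, slice off the prefix, 3-digit test
def pvMatchA (puml_stem img_stem : String) : Bool :=
  if PySem.Str.startswith img_stem (puml_stem ++ "_") then
    let suffix := PySem.Str.slice img_stem (some (PySem.Str.len puml_stem + 1)) none
    PySem.Str.strIsdigit suffix && (PySem.Str.len suffix == 3)
  else false

def check_puml_has_image (puml_stem : String) (image_stems : List String) : Bool :=
  if image_stems.contains puml_stem then true
  else image_stems.any (pvMatchA puml_stem)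

-- ===== PORT B =====
def pvDigits : List Char := ['0','1','2','3','4','5','6','7','8','9']

def check_puml_has_image_alt (puml_stem : String) (image_stems : List String) : Bool :=
  if image_stems.contains puml_stem then true
  else
    let pre := puml_stem ++ "_"
    pvDigits.any fun a => pvDigits.any fun b => pvDigits.any fun c =>
      image_stems.contains (pre ++ String.ofList [a, b, c])

-- ===== PRECONDITION & SPEC =====
def Spec_check_puml_has_image (puml_stem : String) (image_stems : List String) (out : Bool) : Prop := out = check_puml_has_image_alt puml_stem image_stems
instance (puml_stem : String) (image_stems : List String) (out : Bool) : Decidable (Spec_check_puml_has_image puml_stem image_stems out) := by unfold Spec_check_puml_has_image; infer_instance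

-- ===== CLAIM (what is proved, stated in full; the proofs are below) =====
def Claim_equal_check_puml_has_image : Prop := ∀ (puml_stem : String) (image_stems : List String), Dom_check_puml_has_image puml_stem image_stems → Spec_check_puml_has_image puml_stem image_stems (check_puml_has_image puml_stem image_stems)

-- ===== LEMMAS AND PROOFS =====

lemma pv_isdigit_iff (c : Char) : PySem.Chars.isdigit c = true ↔ c ∈ pvDigits := by
  simp only [PySem.Chars.isdigit, Bool.and_eq_true, decide_eq_true_eq, pvDigits,
    List.mem_cons, List.not_mem_nil, or_false]
  constructor
  · rintro ⟨h1, h2⟩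
    have a1 : 48 ≤ c.toNat := Char.le_def.mp h1
    have a2 : c.toNat ≤ 57 := Char.le_def.mp h2
    have hn : c.toNat = 48 ∨ c.toNat = 49 ∨ c.toNat = 50 ∨ c.toNat = 51 ∨ c.toNat = 52 ∨
        c.toNat = 53 ∨ c.toNat = 54 ∨ c.toNat = 55 ∨ c.toNat = 56 ∨ c.toNat = 57 := by omega
    rcases hn with h|h|h|h|h|h|h|h|h|h <;> rw [← Char.ofNat_toNat c, h] <;> decide
  · rintro (rfl|rfl|rfl|rfl|rfl|rfl|rfl|rfl|rfl|rfl) <;> exact ⟨by decide, by decide⟩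

lemma pv_suffix_toList (p s : String) :
    (PySem.Str.slice s (some (PySem.Str.len p + 1)) none).toList
      = s.toList.drop (p.toList.length + 1) := by
  have h : PySem.Str.len p + 1 = ((p.toList.length + 1 : Nat) : Int) := by
    rw [PySem.Str.len_eq]; push_cast; ring
  rw [PySem.Str.toList_slice, PySem.Chars.slice_eq_listSlice, h,
    PySem.List.slice_from_natCast]

lemma pv_matchA_iff (p s : String) :
    pvMatchA p s = true ↔
      ∃ a ∈ pvDigits, ∃ b ∈ pvDigits, ∃ c ∈ pvDigits,
        s = (p ++ "_") ++ String.ofList [a, b, c] := by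
  unfold pvMatchA
  by_cases hsw : PySem.Str.startswith s (p ++ "_") = true
  · simp only [hsw, if_true]
    have hpre : (p ++ "_").toList <+: s.toList := by
      rw [← PySem.Chars.startswith_iff]
      simpa using hsw
    obtain ⟨R, hR⟩ := hpre
    have hlen : (p ++ "_").toList.length = p.toList.length + 1 := by
      simp [String.toList_append]
    have hsuf : (PySem.Str.slice s (some (PySem.Str.len p + 1)) none).toList = R := by
      rw [pv_suffix_toList, ← hR, ← hlen, List.drop_left]
    constructor
    · intro hb
      simp only [Bool.and_eq_true, PySem.Str.strIsdigit_eq, beq_iff_eq] at hb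
      obtain ⟨hdig, hl3⟩ := hb
      have hl3' : R.length = 3 := by
        rw [PySem.Str.len_eq, hsuf] at hl3
        exact_mod_cast hl3
      obtain ⟨a, b, c, rfl⟩ := List.length_eq_three.mp hl3'
      rw [hsuf] at hdig
      simp only [PySem.Chars.strIsdigit, Bool.and_eq_true, List.all_cons, List.all_nil,
        Bool.and_true] at hdig
      obtain ⟨-, ha, hb', hc⟩ := hdig
      refine ⟨a, (pv_isdigit_iff a).mp ha, b, (pv_isdigit_iff b).mp hb',
        c, (pv_isdigit_iff c).mp hc, ?_⟩
      apply String.toList_inj.mp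
      rw [← hR]
      simp [String.toList_append]
    · rintro ⟨a, ha, b, hb, c, hc, hs⟩
      have hReq : R = [a, b, c] := by
        have := congrArg String.toList hs
        rw [← hR] at this
        simp only [String.toList_append, String.toList_ofList] at this
        exact List.append_cancel_left this
      subst hReq
      simp only [Bool.and_eq_true, PySem.Str.strIsdigit_eq, beq_iff_eq]
      constructor
      · rw [hsuf]
        simp only [PySem.Chars.strIsdigit, Bool.and_eq_true, List.all_cons, List.all_nil,
          Bool.and_true]
        exact ⟨by simp, (pv_isdigit_iff a).mpr ha, (pv_isdigit_iff b).mpr hb,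
          (pv_isdigit_iff c).mpr hc⟩
      · rw [PySem.Str.len_eq, hsuf]
        rfl
  · rw [if_neg hsw]
    simp only [Bool.false_eq_true, false_iff]
    rintro ⟨a, -, b, -, c, -, rfl⟩
    refine hsw ?_
    rw [PySem.Str.startswith_eq, PySem.Chars.startswith_iff]
    have h2 : ((p ++ "_") ++ String.ofList [a, b, c]).toList
        = (p ++ "_").toList ++ (String.ofList [a, b, c]).toList := String.toList_append
    rw [h2]
    exact List.prefix_append _ _

-- ===== VERDICT (by name: the statement is the Claim_ definition above) =====
theorem check_puml_has_image_spec : Claim_equal_check_puml_has_image := by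
  intro p l _
  unfold Spec_check_puml_has_image check_puml_has_image check_puml_has_image_alt
  by_cases hc : l.contains p = true
  · rw [if_pos hc, if_pos hc]
  · rw [if_neg hc, if_neg hc]
    rw [Bool.eq_iff_iff]
    simp only [List.any_eq_true, pv_matchA_iff, List.contains_iff_mem]
    constructor
    · rintro ⟨s, hs, a, ha, b, hb, c, hcd, rfl⟩
      exact ⟨a, ha, b, hb, c, hcd, hs⟩
    · rintro ⟨a, ha, b, hb, c, hcd, hmem⟩
      exact ⟨_, hmem, a, ha, b, hb, c, hcd, rfl⟩
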